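-- pv_equiv track=rewrite | github.com/jeffreyhsu2820/Modern-Optimization-Method | Ant Colony Optimization.py | best_worst
-- ===== SOURCE A (Python) =====
-- def best_worst(evaluate_value):
--     best=min(evaluate_value)
--     count=0
--     for i in range(len(evaluate_value)):
--         if evaluate_value[i] == best:
--             count+=1
--             best_index=i
--     worst=max(evaluate_value)
--     return best, best_index, worst, count
-- ===== SOURCE B (Python) =====
-- def best_worst(evaluate_value):
--     best = worst = evaluate_value[0]
--     best_index, count = 0, 1
--     for i, v in enumerate(evaluate_value[1:], 1):
--         if v < best:
--             best, best_index, count = v, i, 1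
--         elif v == best:
--             best_index, count = i, count + 1
--         if worst < v:
--             worst = v
--     return best, best_index, worst, count
-- ===== Notes on version B (the rewrite author's own statement) =====
-- stated objective: alternative
-- what changed: One linear pass maintains best, last min-index, worst and min-count simultaneously instead of A's three traversals (min(), an index loop, max()).
import Mathlib
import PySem

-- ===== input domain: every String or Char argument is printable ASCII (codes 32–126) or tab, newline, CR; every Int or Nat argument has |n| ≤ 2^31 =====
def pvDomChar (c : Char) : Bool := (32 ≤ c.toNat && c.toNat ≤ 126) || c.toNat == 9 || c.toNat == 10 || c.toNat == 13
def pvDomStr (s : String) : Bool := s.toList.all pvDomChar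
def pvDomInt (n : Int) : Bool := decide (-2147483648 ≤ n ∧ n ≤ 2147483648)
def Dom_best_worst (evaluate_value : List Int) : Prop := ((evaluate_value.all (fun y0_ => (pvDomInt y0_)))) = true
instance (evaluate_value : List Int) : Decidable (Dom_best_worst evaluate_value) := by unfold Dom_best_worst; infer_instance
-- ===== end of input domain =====

-- B replaces A's three traversals (min(), an index loop, max()) by one linear pass
-- maintaining best, last min-index, worst and min-count together (objective: alternative).

-- ===== PORT A =====
-- best=min(xs); count=0; for i in range(len(xs)): if xs[i]==best: count+=1; best_index=i; worst=max(xs)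
def best_worst (evaluate_value : List Int) : Int × Int × Int × Int :=
  match PySem.List.min? evaluate_value (fun y => y),
        PySem.List.max? evaluate_value (fun y => y) with
  | some best, some worst =>
      let s := (PySem.List.pyRange 0 (PySem.List.len evaluate_value) 1).foldl
        (fun (s : Int × Int) i =>
          if PySem.List.pyGetD evaluate_value i 0 = best then (s.1 + 1, i) else s)
        (0, 0)
      (best, s.2, worst, s.1)
  | _, _ => (0, 0, 0, 0)   -- unreachable under Pre_ (Python raises ValueError on [])

-- ===== PORT B =====
-- the loop: for i, v in enumerate(xs[1:], 1): …
def bwLoop : List Int → Int → Int × Int × Int × Int → Int × Int × Int × Int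
  | [], _, s => s
  | v :: t, i, (best, bi, worst, count) =>
      if v < best then bwLoop t (i + 1) (v, i, (if worst < v then v else worst), 1)
      else if v = best then bwLoop t (i + 1) (best, i, (if worst < v then v else worst), count + 1)
      else bwLoop t (i + 1) (best, bi, (if worst < v then v else worst), count)

def best_worst_alt (evaluate_value : List Int) : Int × Int × Int × Int :=
  match evaluate_value with
  | [] => (0, 0, 0, 0)   -- unreachable under Pre_ (Python raises IndexError on [])
  | v :: t => bwLoop t 1 (v, 0, v, 1)

-- ===== PRECONDITION & SPEC =====
-- Pre_ excludes only the empty list, on which A raises ValueError (min of empty sequence).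
def Pre_best_worst (evaluate_value : List Int) : Prop := evaluate_value ≠ []
instance (evaluate_value : List Int) : Decidable (Pre_best_worst evaluate_value) := by
  unfold Pre_best_worst; infer_instance

def pvWitness_best_worst : List Int := [3, 1, 4, 1, 5]

def Spec_best_worst (evaluate_value : List Int) (out : Int × Int × Int × Int) : Prop := out = best_worst_alt evaluate_value
instance (evaluate_value : List Int) (out : Int × Int × Int × Int) : Decidable (Spec_best_worst evaluate_value out) := by unfold Spec_best_worst; infer_instance

-- ===== CLAIM (what is proved, stated in full; the proofs are below) =====
def Claim_equal_best_worst : Prop := ∀ (evaluate_value : List Int), Dom_best_worst evaluate_value → Pre_best_worst evaluate_value → Spec_best_worst evaluate_value (best_worst evaluate_value)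

-- ===== LEMMAS AND PROOFS =====

-- index (as Int) of the LAST occurrence of m in xs (0 if absent; only used when m ∈ xs)
def lastIdx : List Int → Int → Int
  | [], _ => 0
  | _ :: t, m => if m ∈ t then lastIdx t m + 1 else 0

-- A's counting loop, read over enumerate: adds the count of best and records the last index.
theorem afold_char (best : Int) :
    ∀ (xs : List Int) (s c bi : Int),
      (PySem.List.enumerate xs s).foldl
        (fun (st : Int × Int) p => if p.2 = best then (st.1 + 1, p.1) else st) (c, bi)
      = (c + (xs.count best : Int), if best ∈ xs then s + lastIdx xs best else bi) := by
  intro xs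
  induction xs with
  | nil => intro s c bi; simp [PySem.List.enumerate_nil]
  | cons v t ih =>
    intro s c bi
    rw [PySem.List.enumerate_cons]
    simp only [List.foldl_cons]
    by_cases hv : v = best
    · simp only [hv, if_pos rfl]
      rw [ih]
      by_cases ht : best ∈ t
      · simp [ht, lastIdx, List.count_cons, hv]; constructor
        · push_cast; ring
        · omega
      · simp [ht, lastIdx, List.count_cons, hv]; push_cast; ring
    · simp only [if_neg hv]
      rw [ih]
      by_cases ht : best ∈ t
      · simp [ht, lastIdx, List.count_cons, hv, Ne.symm hv]; omega
      · simp [ht, lastIdx, List.count_cons, hv, Ne.symm hv]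

-- B's single pass, characterized.
theorem bwLoop_char :
    ∀ (t : List Int) (i b bi w c : Int),
      bwLoop t i (b, bi, w, c)
      = (t.foldl min b,
         if t.foldl min b ∈ t then i + lastIdx t (t.foldl min b) else bi,
         t.foldl max w,
         if t.foldl min b < b then (t.count (t.foldl min b) : Int)
         else c + (t.count b : Int)) := by
  intro t
  induction t with
  | nil => intro i b bi w c; simp [bwLoop]
  | cons v t' ih =>
    intro i b bi w c
    have hmax : (if w < v then v else w) = max w v := by
      rw [max_def]; split_ifs <;> omega
    rcases lt_trichotomy v b with h1 | h1 | h1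
    · have hbv : min b v = v := by omega
      simp only [bwLoop, if_pos h1, List.foldl_cons, hbv, hmax]
      rw [ih]
      have hmem := PySem.List.foldl_min_mem t' v
      have hle := PySem.List.foldl_min_le t' v
      simp only [Prod.mk.injEq]
      refine ⟨by trivial, ?_, by trivial, ?_⟩
      · by_cases hmt : t'.foldl min v ∈ t'
        · have hcons : t'.foldl min v ∈ v :: t' := List.mem_cons_of_mem _ hmt
          simp only [if_pos hmt, if_pos hcons, lastIdx, if_pos hmt]
          omega
        · have hmv : t'.foldl min v = v := by tauto
          have hcons : t'.foldl min v ∈ v :: t' := by rw [hmv]; exact List.mem_cons_self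
          simp only [if_neg hmt, if_pos hcons, lastIdx, if_neg hmt]
          omega
      · have hlt : t'.foldl min v < b := by omega
        simp only [if_pos hlt]
        by_cases hmv : t'.foldl min v = v
        · have hnlt : ¬ t'.foldl min v < v := by omega
          simp only [if_neg hnlt]
          simp [List.count_cons, hmv]
          omega
        · have hlt' : t'.foldl min v < v := by omega
          have hne : v ≠ t'.foldl min v := by omega
          simp only [if_pos hlt']
          simp [List.count_cons, hne]
    · subst h1
      simp only [bwLoop, if_neg (lt_irrefl v), eq_self_iff_true, if_true, List.foldl_cons, min_self, hmax]
      rw [ih]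
      have hmem := PySem.List.foldl_min_mem t' v
      have hle := PySem.List.foldl_min_le t' v
      simp only [Prod.mk.injEq]
      refine ⟨by trivial, ?_, by trivial, ?_⟩
      · by_cases hmt : t'.foldl min v ∈ t'
        · have hcons : t'.foldl min v ∈ v :: t' := List.mem_cons_of_mem _ hmt
          simp only [if_pos hmt, if_pos hcons, lastIdx, if_pos hmt]
          omega
        · have hmv : t'.foldl min v = v := by tauto
          have hcons : t'.foldl min v ∈ v :: t' := by rw [hmv]; exact List.mem_cons_self
          simp only [if_neg hmt, if_pos hcons, lastIdx, if_neg hmt]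
          omega
      · by_cases hlt : t'.foldl min v < v
        · have : v ≠ t'.foldl min v := by omega
          simp only [if_pos hlt]
          simp [List.count_cons, this]
        · simp only [if_neg hlt]
          simp [List.count_cons]
          push_cast; ring
    · have hbv : min b v = b := by omega
      simp only [bwLoop, if_neg (by omega : ¬ v < b), if_neg (by omega : ¬ v = b),
        List.foldl_cons, hbv, hmax]
      rw [ih]
      have hmem := PySem.List.foldl_min_mem t' b
      have hle := PySem.List.foldl_min_le t' b
      have hmv : v ≠ t'.foldl min b := by omega
      simp only [Prod.mk.injEq]
      refine ⟨by trivial, ?_, by trivial, ?_⟩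
      · by_cases hmt : t'.foldl min b ∈ t'
        · have hcons : t'.foldl min b ∈ v :: t' := List.mem_cons_of_mem _ hmt
          simp only [if_pos hmt, if_pos hcons, lastIdx, if_pos hmt]
          omega
        · have hcons : t'.foldl min b ∉ v :: t' := by
            intro h
            rcases List.mem_cons.mp h with h' | h'
            · exact hmv h'.symm
            · exact hmt h'
          simp only [if_neg hmt, if_neg hcons]
      · have hvb : v ≠ b := by omega
        by_cases hlt : t'.foldl min b < b
        · simp only [if_pos hlt]
          simp [List.count_cons, hmv]
        · simp only [if_neg hlt]
          simp [List.count_cons, hmv, hvb]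

theorem best_worst_spec : Claim_equal_best_worst := by
  intro xs _ hpre
  unfold Spec_best_worst
  match xs with
  | [] => exact absurd rfl hpre
  | v :: t =>
    unfold best_worst best_worst_alt
    rw [PySem.List.min?_id_cons, PySem.List.max?_id_cons]
    simp only []
    have hmem := PySem.List.foldl_min_mem t v
    have hle := PySem.List.foldl_min_le t v
    -- rewrite A's range/getD fold as a fold over enumerate
    have henum : (PySem.List.pyRange 0 (PySem.List.len (v :: t)) 1).foldl
        (fun (s : Int × Int) i =>
          if PySem.List.pyGetD (v :: t) i 0 = t.foldl min v then (s.1 + 1, i) else s) (0, 0)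
        = (PySem.List.enumerate (v :: t) 0).foldl
            (fun (st : Int × Int) p => if p.2 = t.foldl min v then (st.1 + 1, p.1) else st) (0, 0) := by
      rw [PySem.List.enumerate_eq_map_pyRange (d := 0), List.foldl_map]
    rw [henum, afold_char, bwLoop_char]
    have hconsmem : t.foldl min v ∈ v :: t := by
      rcases hmem with h | h
      · rw [h]; exact List.mem_cons_self
      · exact List.mem_cons_of_mem _ h
    simp only [if_pos hconsmem, Prod.mk.injEq]
    refine ⟨by trivial, ?_, by trivial, ?_⟩
    · by_cases hmt : t.foldl min v ∈ t
      · simp only [lastIdx, if_pos hmt]; omega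
      · simp only [lastIdx, if_neg hmt]; omega
    · by_cases hlt : t.foldl min v < v
      · have : v ≠ t.foldl min v := by omega
        simp only [if_pos hlt]
        simp [List.count_cons, this]
      · have hmv : t.foldl min v = v := by omega
        simp only [if_neg hlt]
        simp [List.count_cons, hmv]
        push_cast; ring
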